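-- pv_equiv track=rewrite | github.com/steezeburger/brainspread | packages/django-app/app/assets/forms/upload_asset_form.py | _mime_matches_whitelist
-- ===== SOURCE A (Python) =====
-- def _mime_matches_whitelist(content_type: str, whitelist) -> bool:
--     """
--     Check `content_type` against a whitelist that may contain literal
--     MIME strings ("image/png") or `prefix/*` wildcards ("text/*").
--
--     The wildcard form lets us accept text-shaped uploads
--     (text/plain, text/csv, text/x-python, text/x-shellscript, ...) in
--     one entry rather than enumerating every code extension's MIME -
--     browsers are inconsistent about which one they send for a given
--     extension and we'd otherwise reject perfectly reasonable files.
--     """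
--     if not content_type:
--         return False
--     for entry in whitelist:
--         entry = entry.strip().lower()
--         if not entry:
--             continue
--         if entry.endswith("/*"):
--             prefix = entry[:-1]  # keep the trailing slash so "text/" matches
--             if content_type.startswith(prefix):
--                 return True
--         elif entry == content_type:
--             return True
--     return False
-- ===== SOURCE B (Python) =====
-- def _mime_matches_whitelist(content_type: str, whitelist) -> bool:
--     # Inverted algorithm: instead of classifying each whitelist entry, derive
--     # from content_type the exact set of patterns that would match it -- the
--     # string itself plus, for every '/' in it, the wildcard pattern made of the
--     # prefix up to and including that slash followed by '*'.  An entry matches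
--     # iff its normalized form is one of these candidate patterns.
--     if not content_type:
--         return False
--     candidates = {content_type}
--     for i, ch in enumerate(content_type):
--         if ch == '/':
--             candidates.add(content_type[:i + 1] + '*')
--     return any(entry.strip().lower() in candidates for entry in whitelist)
-- ===== Notes on version B (the rewrite author's own statement) =====
-- stated objective: alternative
-- what changed: B inverts the matching: it derives from content_type the finite set of patterns that could match it (the string itself plus, for each '/' in it, the prefix up to that slash followed by '*') and then tests whether any normalized whitelist entry is in that candidate set, instead of A's loop that classifies each entry as literal or wildcard and tests it against content_type.
import Mathlib
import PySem

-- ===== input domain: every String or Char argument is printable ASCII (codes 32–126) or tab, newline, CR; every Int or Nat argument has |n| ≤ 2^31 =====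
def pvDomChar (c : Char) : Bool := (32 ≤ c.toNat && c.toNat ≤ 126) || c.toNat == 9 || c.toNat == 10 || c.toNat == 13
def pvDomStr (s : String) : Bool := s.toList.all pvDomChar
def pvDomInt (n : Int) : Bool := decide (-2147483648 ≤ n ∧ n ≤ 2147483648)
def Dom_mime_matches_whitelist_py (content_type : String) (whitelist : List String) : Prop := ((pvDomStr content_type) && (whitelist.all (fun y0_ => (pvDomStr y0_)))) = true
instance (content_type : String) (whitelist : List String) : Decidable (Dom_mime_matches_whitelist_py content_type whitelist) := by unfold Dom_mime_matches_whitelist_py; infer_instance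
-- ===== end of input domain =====

-- B inverts the matching: it builds the set of patterns that could match
-- content_type and tests whitelist entries for membership (alternative algorithm).

-- ===== PORT A =====
-- the 'for entry in whitelist' loop with its early returns
def pvLoopA (content_type : String) : List String → Bool
  | [] => false
  | e :: rest =>
    let entry := PySem.Str.lower (PySem.Str.strip e)
    if entry == "" then pvLoopA content_type rest
    else if PySem.Str.endswith entry "/*" then
      if PySem.Str.startswith content_type (PySem.Str.slice entry none (some (-1))) then true
      else pvLoopA content_type rest
    else if entry == content_type then true
    else pvLoopA content_type rest

def mime_matches_whitelist_py (content_type : String) (whitelist : List String) : Bool :=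
  if content_type == "" then false
  else pvLoopA content_type whitelist

-- ===== PORT B =====
-- candidates = {ct} ∪ { ct[:i+1] + '*' | ct[i] = '/' }  (on code-point lists)
def pvCands (L : List Char) : PySem.Set (List Char) :=
  (PySem.List.enumerate L 0).foldl
    (fun cs p =>
      if p.2 == '/' then PySem.Set.add cs (PySem.List.slice L none (some (p.1 + 1)) ++ ['*'])
      else cs)
    (PySem.Set.add PySem.Set.empty L)

def mime_matches_whitelist_py_alt (content_type : String) (whitelist : List String) : Bool :=
  if content_type == "" then false
  else
    let cands := pvCands content_type.toList
    whitelist.any (fun entry =>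
      PySem.Set.contains cands (PySem.Chars.lower (PySem.Chars.strip entry.toList)))

-- ===== PRECONDITION & SPEC =====
def Spec_mime_matches_whitelist_py (content_type : String) (whitelist : List String) (out : Bool) : Prop := out = mime_matches_whitelist_py_alt content_type whitelist
instance (content_type : String) (whitelist : List String) (out : Bool) : Decidable (Spec_mime_matches_whitelist_py content_type whitelist out) := by unfold Spec_mime_matches_whitelist_py; infer_instance

-- ===== CLAIM (what is proved, stated in full; the proofs are below) =====
def Claim_equal_mime_matches_whitelist_py : Prop := ∀ (content_type : String) (whitelist : List String), Dom_mime_matches_whitelist_py content_type whitelist → Spec_mime_matches_whitelist_py content_type whitelist (mime_matches_whitelist_py content_type whitelist)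

-- ===== LEMMAS AND PROOFS =====

-- membership in the candidate-building fold
lemma pv_mem_candFold (L : List Char) (E : List Char) (l : List (Int × Char))
    (s : PySem.Set (List Char)) :
    (E ∈ l.foldl
      (fun cs p =>
        if p.2 == '/' then PySem.Set.add cs (PySem.List.slice L none (some (p.1 + 1)) ++ ['*'])
        else cs) s)
    ↔ E ∈ s ∨ ∃ p ∈ l, p.2 = '/' ∧ E = PySem.List.slice L none (some (p.1 + 1)) ++ ['*'] := by
  induction l generalizing s with
  | nil => simp
  | cons q t ih =>
    simp only [List.foldl_cons]
    by_cases hq : q.2 = '/'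
    · rw [if_pos (by simpa using hq), ih]
      simp [PySem.Set.mem_add, hq]
      tauto
    · rw [if_neg (by simpa using hq), ih]
      simp [hq]

-- characterization of the candidate set
lemma pv_mem_cands (L E : List Char) :
    E ∈ pvCands L ↔ E = L ∨ ∃ k, ∃ _ : k < L.length, L[k] = '/' ∧ E = L.take (k + 1) ++ ['*'] := by
  unfold pvCands
  rw [pv_mem_candFold]
  simp only [PySem.Set.mem_add, PySem.List.mem_enumerate_iff]
  constructor
  · rintro (h | ⟨p, ⟨k, hk, rfl⟩, hsl, rfl⟩)
    · simp [PySem.Set.empty] at h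
      exact Or.inl h
    · refine Or.inr ⟨k, hk, hsl, ?_⟩
      have : (0 : Int) + (k : Int) + 1 = ((k + 1 : Nat) : Int) := by push_cast; ring
      rw [this, PySem.List.slice_to_natCast]
  · rintro (rfl | ⟨k, hk, hsl, rfl⟩)
    · exact Or.inl (by simp [PySem.Set.empty])
    · refine Or.inr ⟨((0 : Int) + (k : Int), L[k]), ⟨k, hk, rfl⟩, hsl, ?_⟩
      have : (0 : Int) + (k : Int) + 1 = ((k + 1 : Nat) : Int) := by push_cast; ring
      rw [this, PySem.List.slice_to_natCast]

-- per-entry equivalence: A's inline test on an entry list E equals membership in the candidates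
lemma pv_entry (L E : List Char) (hL : L ≠ []) :
    (if E = [] then false
     else if PySem.Chars.endswith E ['/', '*'] then PySem.Chars.startswith L (PySem.List.slice E none (some (-1)))
     else decide (E = L))
    = PySem.Set.contains (pvCands L) E := by
  have hmem := pv_mem_cands L E
  rcases eq_or_ne E [] with rfl | hE
  · have hnot : ¬ ([] ∈ pvCands L) := by
      rw [hmem]
      rintro (rfl | ⟨k, hk, _, habs⟩)
      · exact hL rfl
      · exact absurd habs.symm (by simp)
    simp [PySem.Set.contains, List.contains_eq_mem, hnot]
  · rw [if_neg hE]
    by_cases hes : PySem.Chars.endswith E ['/', '*'] = true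
    · rw [if_pos hes]
      rw [PySem.Chars.endswith_iff] at hes
      obtain ⟨q, rfl⟩ := hes
      rw [PySem.List.slice_to_neg_one]
      have hdl : (q ++ ['/', '*']).dropLast = q ++ ['/'] := by
        rw [show ['/', '*'] = ['/'] ++ ['*'] by rfl, ← List.append_assoc, List.dropLast_concat]
      rw [hdl]
      by_cases hpre : PySem.Chars.startswith L (q ++ ['/']) = true
      · rw [hpre]; symm
        rw [PySem.Chars.startswith_iff] at hpre
        simp only [PySem.Set.contains, List.contains_eq_mem, decide_eq_true_eq, hmem]
        have hlen : q.length + 1 ≤ L.length := by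
          have := hpre.length_le; simpa using this
        have htake : q ++ ['/'] = L.take (q.length + 1) := by
          have := List.prefix_iff_eq_take.mp hpre
          simpa using this
        refine Or.inr ⟨q.length, by omega, ?_, ?_⟩
        · have h9 := List.IsPrefix.getElem hpre (i := q.length) (by simp)
          simpa using h9.symm
        · rw [← htake]; simp
      · simp only [Bool.not_eq_true] at hpre
        rw [hpre]; symm
        simp only [PySem.Set.contains, List.contains_eq_mem, decide_eq_false_iff_not, hmem]
        rintro (heq | ⟨k, hk, hsl, heq⟩)
        · -- E = L: then q ++ ['/'] is a prefix of L (it is L.dropLast ++ nothing extra)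
          apply absurd hpre
          simp only [Bool.not_eq_false, PySem.Chars.startswith_iff]
          rw [← heq]
          exact ⟨['*'], by simp⟩
        · -- E = L.take (k+1) ++ ['*']: then q ++ ['/'] = L.take (k+1), a prefix of L
          apply absurd hpre
          simp only [Bool.not_eq_false, PySem.Chars.startswith_iff]
          have hq : q ++ ['/'] = L.take (k + 1) := by
            have := heq
            rw [show (['/', '*'] : List Char) = ['/'] ++ ['*'] by rfl, ← List.append_assoc] at this
            exact (List.append_inj_left' this (by rfl))
          rw [hq]
          exact List.take_prefix _ _
    · simp only [Bool.not_eq_true] at hes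
      rw [hes]; symm
      simp only [PySem.Set.contains, List.contains_eq_mem, hmem]
      by_cases heq : E = L
      · simp [heq]
      · simp only [heq, false_or]
        apply decide_eq_false
        rintro ⟨k, hk, hsl, rfl⟩
        -- such an E ends with "/*", contradicting hes
        apply absurd hes
        simp only [Bool.not_eq_false, PySem.Chars.endswith_iff]
        have htake : L.take (k + 1) = L.take k ++ [L[k]] := by
          rw [List.take_add_one]; simp [List.getElem?_eq_getElem hk]
        rw [htake, hsl]
        exact ⟨L.take k, by simp⟩

-- the early-return loop is an 'any' over the per-entry candidate test
lemma pv_loop_eq_any (ct : String) (h : ct.toList ≠ []) (wl : List String) :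
    pvLoopA ct wl
      = wl.any (fun e => PySem.Set.contains (pvCands ct.toList) (PySem.Chars.lower (PySem.Chars.strip e.toList))) := by
  induction wl with
  | nil => simp [pvLoopA]
  | cons e rest ih =>
    have hentry := pv_entry ct.toList (PySem.Chars.lower (PySem.Chars.strip e.toList)) h
    rw [List.any_cons, ← ih, ← hentry]
    simp only [pvLoopA]
    have hb1 : (PySem.Str.lower (PySem.Str.strip e) == "") = decide (PySem.Chars.lower (PySem.Chars.strip e.toList) = []) := by
      rw [Bool.eq_iff_iff]; simp [← String.toList_inj]
    have hb2 : PySem.Str.endswith (PySem.Str.lower (PySem.Str.strip e)) "/*"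
        = PySem.Chars.endswith (PySem.Chars.lower (PySem.Chars.strip e.toList)) ['/', '*'] := by
      simp
    have hb3 : PySem.Str.startswith ct (PySem.Str.slice (PySem.Str.lower (PySem.Str.strip e)) none (some (-1)))
        = PySem.Chars.startswith ct.toList (PySem.List.slice (PySem.Chars.lower (PySem.Chars.strip e.toList)) none (some (-1))) := by
      simp
    have hb4 : (PySem.Str.lower (PySem.Str.strip e) == ct) = decide (PySem.Chars.lower (PySem.Chars.strip e.toList) = ct.toList) := by
      rw [Bool.eq_iff_iff]; simp [← String.toList_inj]
    rw [hb1, hb2, hb3, hb4]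
    split_ifs <;> simp_all

-- ===== VERDICT (by name: the statement is the Claim_ definition above) =====
theorem mime_matches_whitelist_py_spec : Claim_equal_mime_matches_whitelist_py := by
  intro content_type whitelist _
  unfold Spec_mime_matches_whitelist_py mime_matches_whitelist_py mime_matches_whitelist_py_alt
  by_cases hct : content_type == ""
  · simp [hct]
  · rw [if_neg hct, if_neg hct]
    have h : content_type.toList ≠ [] := by
      intro h0
      exact absurd (beq_iff_eq.mpr (String.toList_inj.mp (by simpa using h0))) hct
    exact pv_loop_eq_any content_type h whitelist
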